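-- pv_equiv track=rewrite | github.com/dykega/Midterm-Mashup | cgi-bin/request.py | mdate
-- ===== SOURCE A (Python) =====
-- def mdate (string):
--     year = ""
--     month = ""
--     day = ""
--     time = ""
--     part = 0
--     for pos in range(len(string)):
--         if string[pos]=="-" or string[pos] =="T":
--             part += 1
--         else:
--             if part == 0:
--                 year += string[pos]
--             elif part == 1:
--                 month += string[pos]
--             elif part == 2:
--                 day += string[pos]
--             elif part == 3:
--                 time += string[pos]
--     out = month +"/"+day+"/"+year+" at "+time
--     return str(out)
-- ===== SOURCE B (Python) =====
-- def mdate(string):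
--     parts = string.replace("T", "-").split("-") + ["", "", ""]
--     return parts[1] + "/" + parts[2] + "/" + parts[0] + " at " + parts[3]
-- ===== Notes on version B (the rewrite author's own statement) =====
-- stated objective: faster
-- what changed: Replaced the manual position-indexed loop with a 5-field accumulator state machine by a single normalize-then-split tokenization (str.replace + str.split), padding the token list with empty strings and reading the four fields by index.
import Mathlib
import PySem

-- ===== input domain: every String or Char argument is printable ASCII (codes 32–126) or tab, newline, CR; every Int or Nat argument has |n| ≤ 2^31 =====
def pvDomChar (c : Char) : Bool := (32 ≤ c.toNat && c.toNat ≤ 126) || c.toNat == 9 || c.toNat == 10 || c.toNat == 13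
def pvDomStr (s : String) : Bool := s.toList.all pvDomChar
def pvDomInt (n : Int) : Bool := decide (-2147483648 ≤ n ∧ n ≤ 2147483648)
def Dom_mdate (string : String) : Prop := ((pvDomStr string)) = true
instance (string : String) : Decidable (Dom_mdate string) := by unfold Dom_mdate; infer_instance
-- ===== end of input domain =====

-- B replaces A's position-indexed loop with a 5-field state machine by a normalize-then-split
-- tokenization padded with empty fields (measured faster in a timing run); return values proved equal.


-- ===== PORT A =====
-- one step of A's loop body: state = (year, month, day, time, part)
def mdateStep (st : List Char × List Char × List Char × List Char × Int) (c : Char) :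
    List Char × List Char × List Char × List Char × Int :=
  match st with
  | (y, m, d, t, p) =>
    if c = '-' ∨ c = 'T' then (y, m, d, t, p + 1)
    else if p = 0 then (y ++ [c], m, d, t, p)
    else if p = 1 then (y, m ++ [c], d, t, p)
    else if p = 2 then (y, m, d ++ [c], t, p)
    else if p = 3 then (y, m, d, t ++ [c], p)
    else (y, m, d, t, p)

def mdate (string : String) : String :=
  match string.toList.foldl mdateStep ([], [], [], [], (0 : Int)) with
  | (y, m, d, t, _) => String.ofList (m ++ ['/'] ++ d ++ ['/'] ++ y ++ " at ".toList ++ t)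

-- ===== PORT B =====
def mdate_alt (string : String) : String :=
  let parts := PySem.Chars.splitOn (PySem.Chars.replace string.toList ['T'] ['-']) ['-']
      ++ [[], [], []]
  String.ofList (PySem.List.pyGetD parts 1 [] ++ ['/'] ++ PySem.List.pyGetD parts 2 [] ++ ['/'] ++
             PySem.List.pyGetD parts 0 [] ++ " at ".toList ++ PySem.List.pyGetD parts 3 [])

-- ===== PRECONDITION & SPEC =====
def Spec_mdate (string : String) (out : String) : Prop := out = mdate_alt string
instance (string : String) (out : String) : Decidable (Spec_mdate string out) := by unfold Spec_mdate; infer_instance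

-- ===== CLAIM (what is proved, stated in full; the proofs are below) =====
def Claim_equal_mdate : Prop := ∀ (string : String), Dom_mdate string → Spec_mdate string (mdate string)

-- ===== LEMMAS AND PROOFS =====

-- spec-side split on '-' or 'T' (right recursion)
def modHead (c : Char) : List (List Char) → List (List Char)
  | [] => [[c]]
  | h :: t => (c :: h) :: t

def splitTD : List Char → List (List Char)
  | [] => [[]]
  | c :: cs => if c = '-' ∨ c = 'T' then [] :: splitTD cs else modHead c (splitTD cs)

def splitDash : List Char → List (List Char)
  | [] => [[]]
  | c :: cs => if c = '-' then [] :: splitDash cs else modHead c (splitDash cs)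

def modHeadApp (pre : List Char) : List (List Char) → List (List Char)
  | [] => [pre]
  | h :: t => (pre ++ h) :: t

def repl (c : Char) : Char := if c = 'T' then '-' else c

theorem splitDash_ne_nil (cs : List Char) : splitDash cs ≠ [] := by
  cases cs with
  | nil => simp [splitDash]
  | cons c cs =>
    simp only [splitDash]
    split
    · simp
    · cases h : splitDash cs <;> simp [modHead]

theorem splitTD_ne_nil (cs : List Char) : splitTD cs ≠ [] := by
  cases cs with
  | nil => simp [splitTD]
  | cons c cs =>
    simp only [splitTD]
    split
    · simp
    · cases h : splitTD cs <;> simp [modHead]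

theorem replace_go_spec (fuel : Nat) (l : List Char) (acc : List Char)
    (h : l.length ≤ fuel) :
    PySem.Chars.replace.go ['T'] ['-'] fuel l acc = acc.reverse ++ l.map repl := by
  induction fuel generalizing l acc with
  | zero =>
    have : l = [] := List.length_eq_zero_iff.mp (Nat.le_zero.mp h)
    subst this
    simp [PySem.Chars.replace.go]
  | succ fuel ih =>
    cases l with
    | nil => simp [PySem.Chars.replace.go]
    | cons c t =>
      simp only [PySem.Chars.replace.go]
      by_cases hc : c = 'T'
      · subst hc
        simp only [BEq.rfl, Bool.true_and, List.isPrefixOf, if_pos]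
        rw [ih _ _ (by simpa using Nat.le_of_succ_le_succ h)]
        simp [repl]
      · rw [if_neg (by simp; exact fun h => hc h.symm)]
        rw [ih _ _ (by simpa using Nat.le_of_succ_le_succ h)]
        simp [repl, hc]

theorem replace_eq_map (cs : List Char) :
    PySem.Chars.replace cs ['T'] ['-'] = cs.map repl := by
  simp only [PySem.Chars.replace]
  rw [if_neg (by simp)]
  simpa using replace_go_spec cs.length cs [] le_rfl

theorem modHeadApp_modHead (pre : List Char) (c : Char) (s : List (List Char)) (hs : s ≠ []) :
    modHeadApp pre (modHead c s) = modHeadApp (pre ++ [c]) s := by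
  cases s with
  | nil => exact absurd rfl hs
  | cons h t => simp [modHead, modHeadApp]

theorem splitOn_go_spec (fuel : Nat) (l : List Char) (cur : List Char) (acc : List (List Char))
    (h : l.length < fuel) :
    PySem.Chars.splitOn.go ['-'] fuel l cur acc
      = acc.reverse ++ modHeadApp cur.reverse (splitDash l) := by
  induction fuel generalizing l cur acc with
  | zero => omega
  | succ fuel ih =>
    cases l with
    | nil => simp [PySem.Chars.splitOn.go, splitDash, modHeadApp]
    | cons c t =>
      simp only [PySem.Chars.splitOn.go]
      by_cases hc : c = '-'
      · subst hc
        simp only [BEq.rfl, Bool.true_and, List.isPrefixOf, if_pos]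
        rw [ih _ _ _ (by simpa using Nat.lt_of_succ_lt_succ h)]
        obtain ⟨hh, ht, he⟩ : ∃ hh ht, splitDash t = hh :: ht := by
          cases hx : splitDash t with
          | nil => exact absurd hx (splitDash_ne_nil t)
          | cons a b => exact ⟨a, b, rfl⟩
        simp [splitDash, he, modHeadApp]
      · rw [if_neg (by simp; exact fun h => hc h.symm)]
        rw [ih _ _ _ (by simpa using Nat.lt_of_succ_lt_succ h)]
        rw [show splitDash (c :: t) = modHead c (splitDash t) by simp [splitDash, hc]]
        rw [modHeadApp_modHead _ _ _ (splitDash_ne_nil t)]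
        simp

theorem splitOn_dash (l : List Char) :
    PySem.Chars.splitOn l ['-'] = splitDash l := by
  rw [show PySem.Chars.splitOn l ['-'] = PySem.Chars.splitOn.go ['-'] (l.length + 1) l [] []
      from rfl]
  rw [splitOn_go_spec _ _ _ _ (by omega)]
  obtain ⟨hh, ht, he⟩ : ∃ hh ht, splitDash l = hh :: ht := by
    cases hx : splitDash l with
    | nil => exact absurd hx (splitDash_ne_nil l)
    | cons a b => exact ⟨a, b, rfl⟩
  simp [he, modHeadApp]

theorem splitDash_map_repl (cs : List Char) : splitDash (cs.map repl) = splitTD cs := by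
  induction cs with
  | nil => rfl
  | cons c cs ih =>
    by_cases hc : c = '-' ∨ c = 'T'
    · have hr : repl c = '-' := by
        rcases hc with h | h <;> subst h <;> simp [repl]
      simp [splitDash, splitTD, hr, hc, ih]
    · rw [not_or] at hc
      have hr : repl c = c := by simp [repl, hc.2]
      simp [splitDash, splitTD, hr, hc.1, hc.2, ih]

-- loop invariants for A's fold, one per value of part
theorem foldl_p4 (cs : List Char) (y m d t : List Char) (p : Int) (hp : 4 ≤ p) :
    ∃ p', cs.foldl mdateStep (y, m, d, t, p) = (y, m, d, t, p') := by
  induction cs generalizing p with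
  | nil => exact ⟨p, rfl⟩
  | cons c cs ih =>
    simp only [List.foldl_cons, mdateStep]
    split
    · exact ih (p + 1) (by omega)
    · rw [if_neg (by omega), if_neg (by omega), if_neg (by omega), if_neg (by omega)]
      exact ih p hp

theorem foldl_p3 (cs : List Char) (y m d t : List Char) :
    ∃ p', cs.foldl mdateStep (y, m, d, t, 3) = (y, m, d, t ++ (splitTD cs).headD [], p') := by
  induction cs generalizing t with
  | nil => exact ⟨3, by simp [splitTD]⟩
  | cons c cs ih =>
    simp only [List.foldl_cons, mdateStep]
    split
    · rename_i hc
      obtain ⟨p', hp'⟩ := foldl_p4 cs y m d t 4 le_rfl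
      exact ⟨p', by simp [splitTD, hc, hp']⟩
    · rename_i hc
      rw [if_neg (by omega), if_neg (by omega), if_neg (by omega)]
      rw [if_pos trivial]
      obtain ⟨p', hp'⟩ := ih (t ++ [c])
      refine ⟨p', ?_⟩
      rw [hp']
      obtain ⟨hh, ht, he⟩ : ∃ hh ht, splitTD cs = hh :: ht := by
        cases hx : splitTD cs with
        | nil => exact absurd hx (splitTD_ne_nil cs)
        | cons a b => exact ⟨a, b, rfl⟩
      simp [splitTD, hc, he, modHead]

theorem foldl_p2 (cs : List Char) (y m d : List Char) :
    ∃ p', cs.foldl mdateStep (y, m, d, [], 2)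
      = (y, m, d ++ (splitTD cs).headD [], ((splitTD cs).drop 1).headD [], p') := by
  induction cs generalizing d with
  | nil => exact ⟨2, by simp [splitTD]⟩
  | cons c cs ih =>
    simp only [List.foldl_cons, mdateStep]
    split
    · rename_i hc
      obtain ⟨p', hp'⟩ := foldl_p3 cs y m d []
      exact ⟨p', by simpa [splitTD, hc] using hp'⟩
    · rename_i hc
      rw [if_neg (by omega), if_neg (by omega)]
      rw [if_pos trivial]
      obtain ⟨p', hp'⟩ := ih (d ++ [c])
      refine ⟨p', ?_⟩
      rw [hp']
      obtain ⟨hh, ht, he⟩ : ∃ hh ht, splitTD cs = hh :: ht := by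
        cases hx : splitTD cs with
        | nil => exact absurd hx (splitTD_ne_nil cs)
        | cons a b => exact ⟨a, b, rfl⟩
      simp [splitTD, hc, he, modHead]

theorem foldl_p1 (cs : List Char) (y m : List Char) :
    ∃ p', cs.foldl mdateStep (y, m, [], [], 1)
      = (y, m ++ (splitTD cs).headD [], ((splitTD cs).drop 1).headD [],
         ((splitTD cs).drop 2).headD [], p') := by
  induction cs generalizing m with
  | nil => exact ⟨1, by simp [splitTD]⟩
  | cons c cs ih =>
    simp only [List.foldl_cons, mdateStep]
    split
    · rename_i hc
      obtain ⟨p', hp'⟩ := foldl_p2 cs y m []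
      exact ⟨p', by simpa [splitTD, hc] using hp'⟩
    · rename_i hc
      rw [if_neg (by omega)]
      rw [if_pos trivial]
      obtain ⟨p', hp'⟩ := ih (m ++ [c])
      refine ⟨p', ?_⟩
      rw [hp']
      obtain ⟨hh, ht, he⟩ : ∃ hh ht, splitTD cs = hh :: ht := by
        cases hx : splitTD cs with
        | nil => exact absurd hx (splitTD_ne_nil cs)
        | cons a b => exact ⟨a, b, rfl⟩
      simp [splitTD, hc, he, modHead]

theorem foldl_p0 (cs : List Char) (y : List Char) :
    ∃ p', cs.foldl mdateStep (y, [], [], [], 0)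
      = (y ++ (splitTD cs).headD [], ((splitTD cs).drop 1).headD [],
         ((splitTD cs).drop 2).headD [], ((splitTD cs).drop 3).headD [], p') := by
  induction cs generalizing y with
  | nil => exact ⟨0, by simp [splitTD]⟩
  | cons c cs ih =>
    simp only [List.foldl_cons, mdateStep]
    split
    · rename_i hc
      obtain ⟨p', hp'⟩ := foldl_p1 cs y []
      exact ⟨p', by simpa [splitTD, hc] using hp'⟩
    · rename_i hc
      rw [if_pos trivial]
      obtain ⟨p', hp'⟩ := ih (y ++ [c])
      refine ⟨p', ?_⟩
      rw [hp']
      obtain ⟨hh, ht, he⟩ : ∃ hh ht, splitTD cs = hh :: ht := by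
        cases hx : splitTD cs with
        | nil => exact absurd hx (splitTD_ne_nil cs)
        | cons a b => exact ⟨a, b, rfl⟩
      simp [splitTD, hc, he, modHead]

theorem padded_getD (L : List (List Char)) (n : Nat) :
    (L ++ [[], [], []]).getD n [] = ((L.drop n).headD []) := by
  induction L generalizing n with
  | nil =>
    rcases n with _ | _ | _ | n <;> simp [List.getD]
  | cons h t ih =>
    rcases n with _ | n
    · simp
    · simpa using ih n

-- ===== VERDICT (by name: the statement is the Claim_ definition above) =====
theorem mdate_spec : Claim_equal_mdate := by
  unfold Claim_equal_mdate
  intro s _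
  unfold Spec_mdate mdate mdate_alt
  obtain ⟨p', hp'⟩ := foldl_p0 s.toList []
  rw [hp']
  rw [replace_eq_map, splitOn_dash, splitDash_map_repl]
  simp only [PySem.List.pyGetD_ofNat', padded_getD]
  simp
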